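-- pv_equiv track=rewrite | github.com/GMUCERG/LWC | hardware/dummy_lwc/src_rtl/test_all.py | get_lang
-- ===== SOURCE A (Python) =====
-- def get_lang(file: str):
--   for ext in ['vhd', 'vhdl']:
--     if file.endswith('.' + ext):
--       return 'vhdl'
--   if file.endswith('.v'):
--       return 'verilog'
--   if file.endswith('.sv'):
--     return 'system-verilog'
-- ===== SOURCE B (Python) =====
-- _TABLE = {'vhd': 'vhdl', 'vhdl': 'vhdl', 'v': 'verilog', 'sv': 'system-verilog'}
--
-- def get_lang(file: str):
--     parts = file.rsplit('.', 1)
--     if len(parts) == 1: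
--         return None
--     return _TABLE.get(parts[1])
-- ===== Notes on version B (the rewrite author's own statement) =====
-- stated objective: idiomatic
-- what changed: Replaces A's loop of endswith probes and branch chain by a single right-split extracting the extension after the last dot followed by one dict lookup.
import Mathlib
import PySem

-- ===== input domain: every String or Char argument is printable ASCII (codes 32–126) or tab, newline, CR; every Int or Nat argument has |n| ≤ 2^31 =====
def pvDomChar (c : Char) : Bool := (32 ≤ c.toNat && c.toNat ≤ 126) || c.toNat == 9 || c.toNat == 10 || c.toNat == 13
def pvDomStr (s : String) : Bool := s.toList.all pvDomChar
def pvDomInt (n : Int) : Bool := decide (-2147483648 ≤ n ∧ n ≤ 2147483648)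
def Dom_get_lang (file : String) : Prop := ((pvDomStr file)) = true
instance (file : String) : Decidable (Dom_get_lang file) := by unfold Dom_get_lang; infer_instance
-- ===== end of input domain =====

-- B replaces A's loop of endswith probes by extracting the extension after the last dot
-- (rsplit('.', 1)) and a single table lookup — idiomatic, same cost.

-- ===== PORT A =====
-- the 'for ext in ['vhd', 'vhdl']' loop with its early returns
def getLangLoop (file : String) : List String → Option String
  | [] =>
      if PySem.Str.endswith file ".v" then some "verilog"
      else if PySem.Str.endswith file ".sv" then some "system-verilog"
      else none
  | ext :: rest =>
      if PySem.Str.endswith file ("." ++ ext) then some "vhdl"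
      else getLangLoop file rest

def get_lang (file : String) : Option String :=
  getLangLoop file ["vhd", "vhdl"]

-- ===== PORT B =====
-- hand port of file.rsplit('.', 1) (PySem has no rsplit): exact for this single-char
-- separator and maxsplit = 1 — split at the LAST '.' if any, else the whole string
def rsplitDot1 (l : List Char) : List (List Char) :=
  let r := l.reverse
  let t := r.takeWhile (fun c => c ≠ '.')
  if t.length = r.length then [l]
  else [(r.drop (t.length + 1)).reverse, t.reverse]

-- the dict _TABLE of Source B (keys at the Chars level)
def langTable : PySem.Dict (List Char) String :=
  PySem.Dict.ofList [(['v','h','d'], "vhdl"), (['v','h','d','l'], "vhdl"),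
                     (['v'], "verilog"), (['s','v'], "system-verilog")]

def get_lang_alt (file : String) : Option String :=
  let parts := rsplitDot1 file.toList
  if parts.length = 1 then none
  else langTable.get? (parts.getD 1 [])

-- ===== PRECONDITION & SPEC =====
def Spec_get_lang (file : String) (out : Option String) : Prop := out = get_lang_alt file
instance (file : String) (out : Option String) : Decidable (Spec_get_lang file out) := by unfold Spec_get_lang; infer_instance

-- ===== CLAIM (what is proved, stated in full; the proofs are below) =====
def Claim_equal_get_lang : Prop := ∀ (file : String), Dom_get_lang file → Spec_get_lang file (get_lang file)

-- ===== LEMMAS AND PROOFS =====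

-- common characterisation: both ports are determined by the reversed character list
def specR (r : List Char) : Option String :=
  if ['d','h','v','.'] <+: r then some "vhdl"
  else if ['l','d','h','v','.'] <+: r then some "vhdl"
  else if ['v','.'] <+: r then some "verilog"
  else if ['v','s','.'] <+: r then some "system-verilog"
  else none

theorem endswith_rev (file : String) (p : String) (q : List Char)
    (hq : p.toList.reverse = q) :
    PySem.Str.endswith file p = decide (q <+: file.toList.reverse) := by
  subst hq
  rw [PySem.Str.endswith_eq]
  cases hb : PySem.Chars.endswith file.toList p.toList
  · have := (PySem.Chars.endswith_iff file.toList p.toList)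
    rw [hb] at this
    simp only [List.reverse_prefix]
    simp [← this]
  · have := (PySem.Chars.endswith_iff file.toList p.toList).mp hb
    simp only [List.reverse_prefix]
    simp [this]

theorem A_eq (file : String) : get_lang file = specR file.toList.reverse := by
  have h1 := endswith_rev file ("." ++ "vhd") ['d','h','v','.'] rfl
  have h2 := endswith_rev file ("." ++ "vhdl") ['l','d','h','v','.'] rfl
  have h3 := endswith_rev file ".v" ['v','.'] rfl
  have h4 := endswith_rev file ".sv" ['v','s','.'] rfl
  simp only [get_lang, getLangLoop, h1, h2, h3, h4, specR, decide_eq_true_eq]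

-- takeWhile of e ++ '.' :: u is e, when '.' is not in e
theorem takeWhile_dot (e u : List Char) (he : '.' ∉ e) :
    (e ++ '.' :: u).takeWhile (fun c => c ≠ '.') = e := by
  induction e with
  | nil => simp
  | cons a as ih =>
    have ha : a ≠ '.' := by intro h; exact he (by simp [h])
    have has : '.' ∉ as := fun h => he (List.mem_cons_of_mem _ h)
    rw [List.cons_append, List.takeWhile_cons,
        if_pos (show decide (a ≠ '.') = true by simp [ha]), ih has]

-- when a dot occurs, what takeWhile picks plus a dot is a prefix
theorem takeWhile_prefix_dot : ∀ (r : List Char), '.' ∈ r →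
    (r.takeWhile (fun c => c ≠ '.')) ++ ['.'] <+: r := by
  intro r
  induction r with
  | nil => simp
  | cons a as ih =>
    intro hd
    by_cases ha : a = '.'
    · subst ha
      rw [List.takeWhile_cons, if_neg (show ¬ decide (('.' : Char) ≠ '.') = true by simp)]
      exact ⟨as, rfl⟩
    · have hmem : '.' ∈ as := by
        rcases List.mem_cons.mp hd with h | h
        · exact absurd h.symm ha
        · exact h
      have hpre := ih hmem
      rw [List.takeWhile_cons, if_pos (show decide (a ≠ '.') = true by simp [ha]),
          List.cons_append]
      exact (List.cons_prefix_cons).mpr ⟨rfl, hpre⟩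

-- key lemma: for a dotless key e, "r starts with e ++ ['.']" iff takeWhile picks exactly e (and a dot exists)
theorem prefix_iff_takeWhile (e r : List Char) (he : '.' ∉ e) :
    (e ++ ['.'] <+: r) ↔ (r.takeWhile (fun c => c ≠ '.') = e ∧ '.' ∈ r) := by
  constructor
  · rintro ⟨w, hw⟩
    subst hw
    simp only [List.append_assoc, List.singleton_append]
    exact ⟨takeWhile_dot e w he, by simp⟩
  · rintro ⟨ht, hd⟩
    have := takeWhile_prefix_dot r hd
    rwa [ht] at this

theorem table_items : langTable.items =
    [(['v','h','d'], "vhdl"), (['v','h','d','l'], "vhdl"),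
     (['v'], "verilog"), (['s','v'], "system-verilog")] := by decide

theorem B_eq (file : String) : get_lang_alt file = specR file.toList.reverse := by
  simp only [get_lang_alt, rsplitDot1]
  set r := file.toList.reverse with hr
  set t := r.takeWhile (fun c => c ≠ '.') with htdef
  have p1 := prefix_iff_takeWhile ['d','h','v'] r (by decide)
  rw [show ((['d','h','v'] : List Char) ++ ['.']) = ['d','h','v','.'] from rfl] at p1
  have p2 := prefix_iff_takeWhile ['l','d','h','v'] r (by decide)
  rw [show ((['l','d','h','v'] : List Char) ++ ['.']) = ['l','d','h','v','.'] from rfl] at p2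
  have p3 := prefix_iff_takeWhile ['v'] r (by decide)
  rw [show ((['v'] : List Char) ++ ['.']) = ['v','.'] from rfl] at p3
  have p4 := prefix_iff_takeWhile ['v','s'] r (by decide)
  rw [show ((['v','s'] : List Char) ++ ['.']) = ['v','s','.'] from rfl] at p4
  rw [← htdef] at p1 p2 p3 p4
  by_cases hdot : '.' ∈ r
  · -- a dot exists: takeWhile stops strictly before the end
    have hlt : t.length ≠ r.length := by
      have hle := (takeWhile_prefix_dot r hdot).length_le
      rw [← htdef] at hle
      simp only [List.length_append, List.length_cons, List.length_nil] at hle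
      omega
    rw [if_neg hlt]
    rw [if_neg (by simp : ¬ ([(r.drop (t.length + 1)).reverse, t.reverse] : List (List Char)).length = 1)]
    rw [(rfl : (List.getD [(r.drop (t.length + 1)).reverse, t.reverse] 1 []) = t.reverse)]
    simp only [specR, p1, p2, p3, p4]
    by_cases e1 : t = ['d','h','v']
    · rw [e1]; simp [hdot]; decide
    · by_cases e2 : t = ['l','d','h','v']
      · rw [e2]; simp [hdot]; decide
      · by_cases e3 : t = ['v']
        · rw [e3]; simp [hdot]; decide
        · by_cases e4 : t = ['v','s']
          · rw [e4]; simp [hdot]; decide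
          · have r1 : (['v','h','d'] : List Char) ≠ t.reverse := by
              intro h; exact e1 (by rw [← List.reverse_reverse t, ← h]; rfl)
            have r2 : (['v','h','d','l'] : List Char) ≠ t.reverse := by
              intro h; exact e2 (by rw [← List.reverse_reverse t, ← h]; rfl)
            have r3 : (['v'] : List Char) ≠ t.reverse := by
              intro h; exact e3 (by rw [← List.reverse_reverse t, ← h]; rfl)
            have r4 : (['s','v'] : List Char) ≠ t.reverse := by
              intro h; exact e4 (by rw [← List.reverse_reverse t, ← h]; rfl)
            simp [PySem.Dict.get?, table_items, beq_iff_eq, r1, r2, r3, r4, e1, e2, e3, e4]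
  · -- no dot: rsplit keeps the whole string, and no '.xxx' suffix can match
    have hall : t = r := List.takeWhile_eq_self_iff.mpr (by
      intro x hx
      simp only [ne_eq, decide_eq_true_eq]
      intro hx'
      exact hdot (hx' ▸ hx))
    have hc : (if t.length = r.length then [file.toList]
        else [(r.drop (t.length + 1)).reverse, t.reverse]).length = 1 := by
      rw [if_pos (by rw [hall])]
      simp
    rw [if_pos hc]
    simp only [specR, p1, p2, p3, p4]
    simp [hdot]

-- ===== VERDICT (by name: the statement is the Claim_ definition above) =====
theorem get_lang_spec : Claim_equal_get_lang := by
  intro file _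
  unfold Spec_get_lang
  rw [A_eq, B_eq]
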